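-- pv_equiv track=rewrite | github.com/ZeroMin-K/Algorithm-Study | 프로그래머스/Level 1/문자열 나누기-review-solve.py | solution
-- ===== SOURCE A (Python) =====
-- def solution(s):
--     # 분해한 문자열 개수 0으로 초기화
--     answer = 0
--
--     # 문자열 s의 길이가 0보다 큰 동안
--     while len(s) > 0:
--         # x는 문자열의 첫글자
--         x = s[0]
--
--         # x가 나오는 횟수 x_count 0으로 초기화
--         x_count = 0
--         # x가 아닌 횟수 other_count 0으로 초기화
--         other_count = 0
--
--         # 인덱스 i : 0부터 s의 길이 - 1 까지 반복하면서
--         for i in range(len(s)):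
--             # s[i]가 x이면
--             if s[i] == x:
--                 # x_count 1증가
--                 x_count += 1
--             # 나머지 (s[i]가 x가 아니면)
--             else:
--                 # other_count 1증가
--                 other_count += 1
--
--             # x_count와 other_count가 같으면
--             if x_count == other_count:
--                 # i가 s의 길이보다 작으면
--                 if i < len(s):
--                     # 분해한 문자열 개수 answer 1증가
--                     answer += 1
--                     # s는 i+1부터 슬라이싱
--                     s = s[i + 1: ]
--                     # 문자열 도는 거 종료
--                     break
--         # 문자열 전부 돌았는데 중간에 멈추지 않으면
--         else:
--             # 문자열 그대로 분리 종료
--             answer += 1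
--             break
--
--     return answer
-- ===== SOURCE B (Python) =====
-- def solution(s):
--     # Single left-to-right pass: whenever the two running counters are equal we
--     # are at the start of a new chunk, so count it and re-anchor on the current char.
--     answer = 0
--     x = ''
--     same = 0
--     diff = 0
--     for c in s:
--         if same == diff:
--             answer += 1
--             x = c
--             same, diff = 1, 0
--         elif c == x:
--             same += 1
--         else:
--             diff += 1
--     return answer
-- ===== Notes on version B (the rewrite author's own statement) =====
-- stated objective: faster
-- what changed: Replaced A's restart-and-rescan loop (re-slicing the string and rescanning each remaining chunk from an inner for-loop) by a single left-to-right pass with two running counters that re-anchors when the counters equalize.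
import Mathlib
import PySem

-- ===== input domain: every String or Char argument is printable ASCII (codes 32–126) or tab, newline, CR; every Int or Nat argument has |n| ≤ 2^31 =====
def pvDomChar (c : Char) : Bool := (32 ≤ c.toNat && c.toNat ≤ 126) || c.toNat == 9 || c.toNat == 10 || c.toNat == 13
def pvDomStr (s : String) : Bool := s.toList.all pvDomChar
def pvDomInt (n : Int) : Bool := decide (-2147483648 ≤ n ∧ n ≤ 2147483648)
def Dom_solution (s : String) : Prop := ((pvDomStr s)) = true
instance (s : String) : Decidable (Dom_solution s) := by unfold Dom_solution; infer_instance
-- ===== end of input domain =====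

-- B replaces A's O(n^2) restart-and-rescan splitting by one O(n) pass with running counters.

-- ===== PORT A =====
-- Inner `for i in range(len(s))` loop of A, as structural recursion over the
-- remaining characters: updates x_count/other_count, and on x_count == other_count
-- breaks, returning `some` of the slice s[i+1:] (the unvisited tail).  A's guard
-- `if i < len(s)` is always true for i in range(len(s)) and needs no counterpart.
def innerA (x : Char) : List Char → Int → Int → Option (List Char)
  | [], _, _ => none
  | c :: t, xc, oc =>
    let xc' := if c = x then xc + 1 else xc
    let oc' := if c = x then oc else oc + 1
    if xc' = oc' then some t else innerA x t xc' oc'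

-- termination fact the outer while-loop port needs: a break leaves a strictly shorter string
theorem innerA_length (x : Char) : ∀ (l : List Char) (xc oc : Int) (r : List Char),
    innerA x l xc oc = some r → r.length < l.length := by
  intro l
  induction l with
  | nil => intro xc oc r h; simp [innerA] at h
  | cons c t ih =>
    intro xc oc r h
    simp only [innerA] at h
    split_ifs at h
    all_goals first
      | (cases h; simp)
      | exact Nat.lt_trans (ih _ _ _ h) (by simp)

-- A's `while len(s) > 0` loop: x = s[0], run the for-loop; on break continue on the
-- slice with answer+1, on normal for-loop exit (`else`) return answer+1.
def outerA : List Char → Int → Int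
  | [], ans => ans
  | c :: t, ans =>
    match h : innerA c (c :: t) 0 0 with
    | some rest => outerA rest (ans + 1)
    | none => ans + 1
termination_by l _ => l.length
decreasing_by exact innerA_length c (c :: t) 0 0 rest h

def solution (s : String) : Int := outerA s.toList 0

-- ===== PORT B =====
-- Source B's single pass; Python's initial `x = ''` (never compared before reassignment)
-- is `none : Option Char`, so `c == x` is `some c = x`.
def loopB : List Char → Option Char → Int → Int → Int → Int
  | [], _, _, _, ans => ans
  | c :: t, x, same, diff, ans =>
    if same = diff then loopB t (some c) 1 0 (ans + 1)
    else if some c = x then loopB t x (same + 1) diff ans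
    else loopB t x same (diff + 1) ans

def solution_alt (s : String) : Int := loopB s.toList none 0 0 0

-- ===== PRECONDITION & SPEC =====
def Spec_solution (s : String) (out : Int) : Prop := out = solution_alt s
instance (s : String) (out : Int) : Decidable (Spec_solution s out) := by unfold Spec_solution; infer_instance

-- ===== CLAIM (what is proved, stated in full; the proofs are below) =====
def Claim_equal_solution : Prop := ∀ (s : String), Dom_solution s → Spec_solution s (solution s)

-- ===== LEMMAS AND PROOFS =====

-- with equal counters, loopB's next step is a reset: anchor and counter values are irrelevant
theorem loopB_reset (l : List Char) (x y : Option Char) (e : Int) (ans : Int) :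
    loopB l x e e ans = loopB l y 0 0 ans := by
  cases l <;> simp [loopB]

-- one chunk: while the counters differ, loopB tracks A's inner loop exactly;
-- on break it restarts fresh on the remaining tail, on normal exit it is done.
theorem loopB_chunk (x : Char) : ∀ (l : List Char) (xc oc ans : Int), xc ≠ oc →
    loopB l (some x) xc oc ans =
      match innerA x l xc oc with
      | some rest => loopB rest none 0 0 ans
      | none => ans := by
  intro l
  induction l with
  | nil => intro xc oc ans h; simp [loopB, innerA]
  | cons c t ih =>
    intro xc oc ans h
    by_cases hc : c = x
    · subst hc
      simp only [loopB, innerA, if_neg h, if_true]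
      by_cases he : xc + 1 = oc
      · subst he
        rw [if_pos rfl]
        exact loopB_reset t (some c) none (xc + 1) ans
      · simp only [if_neg he]
        exact ih _ _ _ he
    · have hxc : ¬ some c = some x := by simpa using hc
      simp only [loopB, innerA, if_neg h, if_neg hc, if_neg hxc]
      by_cases he : xc = oc + 1
      · subst he
        rw [if_pos rfl]
        exact loopB_reset t (some x) none (oc + 1) ans
      · simp only [if_neg he]
        exact ih _ _ _ he

theorem outerA_eq : ∀ (n : Nat) (l : List Char), l.length ≤ n →
    ∀ (x : Option Char) (ans : Int), outerA l ans = loopB l x 0 0 ans := by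
  intro n
  induction n with
  | zero =>
    intro l hl x ans
    have : l = [] := List.length_eq_zero_iff.mp (Nat.le_zero.mp hl)
    subst this; simp [outerA, loopB]
  | succ n ih =>
    intro l hl x ans
    cases l with
    | nil => simp [outerA, loopB]
    | cons c t =>
      have h0 : loopB (c :: t) x 0 0 ans = loopB t (some c) 1 0 (ans + 1) := by
        simp [loopB]
      have h1 : innerA c (c :: t) 0 0 = innerA c t 1 0 := by
        simp [innerA]
      rw [h0, loopB_chunk c t 1 0 (ans + 1) (by decide)]
      rw [outerA, h1]
      cases hr : innerA c t 1 0 with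
      | none => simp
      | some rest =>
        simp only
        have hlen : rest.length < t.length := innerA_length c t 1 0 rest hr
        have : rest.length ≤ n := by
          have : t.length ≤ n := by simpa using hl
          omega
        exact ih rest this none (ans + 1)

-- ===== VERDICT (by name: the statement is the Claim_ definition above) =====
theorem solution_spec : Claim_equal_solution := by
  intro s _
  unfold Spec_solution solution solution_alt
  exact outerA_eq s.toList.length s.toList le_rfl none 0
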